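-- pv_equiv track=rewrite | github.com/mouredev/retos-programacion-2023 | Retos/Reto #4 - PRIMO, FIBONACCI Y PAR [Media]/python/Maanghel.py | is_prime_fibonacci_even
-- ===== SOURCE A (Python) =====
-- import math
--
-- def is_prime_fibonacci_even(number: int) -> str:
--     """
--     Given an integer `number`, returns a sentence stating whether the number
--     is prime, whether it belongs to the Fibonacci sequence, and whether it is even or odd.
--
--     Returns format:
--         "{n} es/no es primo, es/no es fibonacci y es par/impar"
--
--     Args:
--         number (int): the integer to analyze.
--
--     Raises:
--         TypeError: if `number` is not an int.
--     """
--     if not isinstance(number, int):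
--         raise TypeError("El numero debe ser un entero.")
--
--     even = number % 2 == 0
--
--     if number < 2:
--         prime = False
--     elif number == 2:
--         prime = True
--     elif number % 2 == 0:
--         prime = False
--     else:
--         prime = True
--         limit = math.isqrt(number)
--         for i in range(3, limit + 1, 2):
--             if number % i == 0:
--                 prime = False
--                 break
--
--     def _is_perfect_square(x: int) -> bool:
--         if x < 0:
--             return False
--         square = math.isqrt(x)
--         return square * square == x
--
--     fibonacci = _is_perfect_square(5 * number * number + 4) or _is_perfect_square(5 * number * number - 4)
--
--     prime_str = "es primo" if prime else "no es primo"
--     fib_str = "es fibonacci" if fibonacci else "no es fibonacci"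
--     parity_str = "es par" if even else "es impar"
--
--     return f"{number} {prime_str}, {fib_str} y {parity_str}"
-- ===== SOURCE B (Python) =====
-- import math
--
-- def is_prime_fibonacci_even(number: int) -> str:
--     if not isinstance(number, int):
--         raise TypeError("El numero debe ser un entero.")
--
--     even = number % 2 == 0
--     prime = number >= 2 and all(number % i != 0 for i in range(2, math.isqrt(number) + 1))
--
--     m = abs(number)
--     a, b = 0, 1
--     while a < m:
--         a, b = b, a + b
--     fibonacci = a == m
--
--     prime_str = "es primo" if prime else "no es primo"
--     fib_str = "es fibonacci" if fibonacci else "no es fibonacci"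
--     parity_str = "es par" if even else "es impar"
--
--     return f"{number} {prime_str}, {fib_str} y {parity_str}"
-- ===== Notes on version B (the rewrite author's own statement) =====
-- stated objective: idiomatic
-- what changed: The prime branch-ladder with an odd-step trial loop becomes a single 'n >= 2 and all(...)' over range(2, isqrt(n)+1), and the perfect-square (5n^2+-4) Fibonacci test is replaced by iterating the Fibonacci pair (a,b)=(b,a+b) from (0,1) over abs(number) until a >= |n| and checking a == |n|.
import Mathlib
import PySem

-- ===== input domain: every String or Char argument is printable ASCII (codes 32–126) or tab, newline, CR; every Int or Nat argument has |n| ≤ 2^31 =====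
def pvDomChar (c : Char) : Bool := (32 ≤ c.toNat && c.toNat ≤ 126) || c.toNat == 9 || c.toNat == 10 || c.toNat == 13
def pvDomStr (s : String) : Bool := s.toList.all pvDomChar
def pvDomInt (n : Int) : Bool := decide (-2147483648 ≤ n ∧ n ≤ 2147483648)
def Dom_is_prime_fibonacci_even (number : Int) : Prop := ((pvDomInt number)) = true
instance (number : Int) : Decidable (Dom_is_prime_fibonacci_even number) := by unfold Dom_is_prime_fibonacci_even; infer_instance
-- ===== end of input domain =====

-- B replaces A's branch-ladder trial division by a single all(...) over range(2, isqrt+1)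
-- and A's 5n^2±4 perfect-square Fibonacci test by iterating the Fibonacci pair up to |n| (idiomatic).

-- ===== PORT A =====
-- helper `_is_perfect_square` of A
def pvPerfSqA (x : Int) : Bool :=
  if x < 0 then false
  else
    let square : Int := (Nat.sqrt x.toNat : Int)
    square * square == x

-- A's `for i in range(...): if number % i == 0: prime = False; break`
def pvPrimeLoopA (n : Int) : List Int → Bool
  | [] => true
  | i :: rest => if PySem.Int.mod n i == 0 then false else pvPrimeLoopA n rest

def is_prime_fibonacci_even (number : Int) : String :=
  let even := PySem.Int.mod number 2 == 0
  let prime :=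
    if number < 2 then false
    else if number == 2 then true
    else if PySem.Int.mod number 2 == 0 then false
    else
      let limit : Int := (Nat.sqrt number.toNat : Int)   -- math.isqrt, exact for number ≥ 0
      pvPrimeLoopA number (PySem.List.pyRange 3 (limit + 1) 2)
  let fibonacci := pvPerfSqA (5 * number * number + 4) || pvPerfSqA (5 * number * number - 4)
  let primeStr := if prime then "es primo" else "no es primo"
  let fibStr := if fibonacci then "es fibonacci" else "no es fibonacci"
  let parityStr := if even then "es par" else "es impar"
  PySem.Int.toStr number ++ " " ++ primeStr ++ ", " ++ fibStr ++ " y " ++ parityStr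

-- ===== PORT B =====
-- B's `while a < m: a, b = b, a + b`; fuel only makes the recursion structural (m+3 steps always suffice)
def pvFibLoopB : Nat → Nat → Nat → Nat → Nat
  | 0, a, _, _ => a
  | fuel + 1, a, b, m => if a < m then pvFibLoopB fuel b (a + b) m else a

def is_prime_fibonacci_even_alt (number : Int) : String :=
  let even := PySem.Int.mod number 2 == 0
  let prime := decide (2 ≤ number) &&
    (PySem.List.pyRange 2 ((Nat.sqrt number.toNat : Int) + 1) 1).all
      (fun i => !(PySem.Int.mod number i == 0))
  let m := number.natAbs
  let a := pvFibLoopB (m + 3) 0 1 m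
  let fibonacci := a == m
  let primeStr := if prime then "es primo" else "no es primo"
  let fibStr := if fibonacci then "es fibonacci" else "no es fibonacci"
  let parityStr := if even then "es par" else "es impar"
  PySem.Int.toStr number ++ " " ++ primeStr ++ ", " ++ fibStr ++ " y " ++ parityStr

-- ===== PRECONDITION & SPEC =====
def Spec_is_prime_fibonacci_even (number : Int) (out : String) : Prop := out = is_prime_fibonacci_even_alt number
instance (number : Int) (out : String) : Decidable (Spec_is_prime_fibonacci_even number out) := by unfold Spec_is_prime_fibonacci_even; infer_instance

-- ===== CLAIM (what is proved, stated in full; the proofs are below) =====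
def Claim_equal_is_prime_fibonacci_even : Prop := ∀ (number : Int), Dom_is_prime_fibonacci_even number → Spec_is_prime_fibonacci_even number (is_prime_fibonacci_even number)

-- ===== LEMMAS AND PROOFS =====

lemma pv_sqrt_mul_self_iff (y : ℕ) : (Nat.sqrt y * Nat.sqrt y = y) ↔ ∃ s, s * s = y := by
  constructor
  · intro h; exact ⟨Nat.sqrt y, h⟩
  · rintro ⟨s, rfl⟩
    have hs : Nat.sqrt (s * s) = s := by have := Nat.sqrt_eq' s; rwa [pow_two] at this
    rw [hs]

lemma pv_perfSqA_iff (x : Int) (hx : 0 ≤ x) :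
    pvPerfSqA x = true ↔ ∃ s : ℕ, s * s = x.toNat := by
  unfold pvPerfSqA
  rw [if_neg (by omega)]
  simp only [beq_iff_eq]
  rw [← pv_sqrt_mul_self_iff]
  constructor
  · intro h
    have := congrArg Int.toNat h
    simpa using this
  · intro h
    rw [← Int.toNat_of_nonneg hx]
    exact_mod_cast congrArg (Nat.cast : ℕ → ℤ) h

lemma pv_primeLoopA_eq_all (n : Int) (l : List Int) :
    pvPrimeLoopA n l = l.all (fun i => !(PySem.Int.mod n i == 0)) := by
  induction l with
  | nil => rfl
  | cons i rest ih =>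
    simp only [pvPrimeLoopA, List.all_cons]
    by_cases h : PySem.Int.mod n i == 0 <;> simp [h, ih]

lemma pv_parity (x m : ℕ) (h : x * x = 5 * (m * m) + 4 ∨ x * x + 4 = 5 * (m * m)) :
    x % 2 = m % 2 := by
  rcases Nat.even_or_odd x with ⟨u, hu⟩ | ⟨u, hu⟩ <;>
    rcases Nat.even_or_odd m with ⟨v, hv⟩ | ⟨v, hv⟩ <;>
      subst hu hv <;>
        first
          | omega
          | (exfalso; rcases h with h | h <;>
              (ring_nf at h; generalize u * u = U at h; omega))

-- descent: any solution of x² - 5m² = ±4 is a (Fibonacci, half-Lucas) pair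
lemma pv_descent : ∀ m x : ℕ, (x * x = 5 * (m * m) + 4 ∨ x * x + 4 = 5 * (m * m)) →
    ∃ k, Nat.fib k = m ∧ 2 * Nat.fib (k + 1) = x + m := by
  intro m
  induction m using Nat.strong_induction_on with
  | _ m ih =>
    intro x hx
    match m, ih with
    | 0, _ =>
      rcases hx with h | h
      · have hx2 : x ≤ 2 := by nlinarith
        interval_cases x <;> simp_all
      · exfalso; nlinarith
    | 1, _ =>
      rcases hx with h | h
      · have hx3 : x ≤ 3 := by nlinarith
        have : x = 3 := by interval_cases x <;> omega
        exact ⟨2, by simp, by simp [this, Nat.fib_add_two]⟩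
      · have hx1 : x ≤ 1 := by nlinarith
        have : x = 1 := by interval_cases x <;> omega
        exact ⟨1, by simp, by simp [this]⟩
    | (m + 2), ih =>
      have hm2 : 2 ≤ m + 2 := by omega
      -- bounds 2(m+2) ≤ x ≤ 3(m+2)
      have hxu : x ≤ 3 * (m + 2) := by
        by_contra hc
        rw [not_le] at hc
        rcases hx with h | h <;> nlinarith
      have hxl : 2 * (m + 2) ≤ x := by
        by_contra hc
        rw [not_le] at hc
        rcases hx with h | h <;> nlinarith
      have hpar : x % 2 = (m + 2) % 2 := pv_parity x (m + 2) hx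
      obtain ⟨m', hm'⟩ : ∃ m', 2 * m' + x = 3 * (m + 2) := ⟨(3 * (m + 2) - x) / 2, by omega⟩
      obtain ⟨x', hx'⟩ : ∃ x', 2 * x' + 5 * (m + 2) = 3 * x := ⟨(3 * x - 5 * (m + 2)) / 2, by omega⟩
      have hlt : m' < m + 2 := by omega
      have q1 : (2 * x' + 5 * (m + 2)) * (2 * x' + 5 * (m + 2)) = (3 * x) * (3 * x) := by rw [hx']
      have q2 : (2 * m' + x) * (2 * m' + x) = (3 * (m + 2)) * (3 * (m + 2)) := by rw [hm']
      have q3 : (2 * m' + x) * x = (3 * (m + 2)) * x := by rw [hm']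
      have q4 : (2 * x' + 5 * (m + 2)) * (m + 2) = (3 * x) * (m + 2) := by rw [hx']
      have hx'c : x' * x' = 5 * (m' * m') + 4 ∨ x' * x' + 4 = 5 * (m' * m') := by
        rcases hx with h | h
        · left; nlinarith [q1, q2, q3, q4]
        · right; nlinarith [q1, q2, q3, q4]
      obtain ⟨k, hk1, hk2⟩ := ih m' hlt x' hx'c
      have e1 : Nat.fib (k + 2) = Nat.fib k + Nat.fib (k + 1) := Nat.fib_add_two
      have e2 : Nat.fib (k + 2 + 1) = Nat.fib (k + 1) + Nat.fib (k + 2) := Nat.fib_add_two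
      exact ⟨k + 2, by omega, by omega⟩

-- ascent: every Fibonacci number solves x² - 5m² = ±4
lemma pv_ascent : ∀ k : ℕ, ∃ x,
    (x * x = 5 * (Nat.fib k * Nat.fib k) + 4 ∨ x * x + 4 = 5 * (Nat.fib k * Nat.fib k)) ∧
    2 * Nat.fib (k + 1) = x + Nat.fib k := by
  intro k
  induction k with
  | zero => exact ⟨2, Or.inl (by simp), by simp⟩
  | succ k ih =>
    obtain ⟨x, hx, hs⟩ := ih
    set a := Nat.fib k
    set b := Nat.fib (k + 1)
    refine ⟨b + 2 * a, ?_, ?_⟩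
    · have e1 : 2 * (b + 2 * a) = x + 5 * a := by omega
      have q1 : (2 * (b + 2 * a)) * (2 * (b + 2 * a)) = (x + 5 * a) * (x + 5 * a) := by rw [e1]
      have q2 : (2 * b) * (2 * b) = (x + a) * (x + a) := by rw [hs]
      rcases hx with h | h
      · right; nlinarith [q1, q2]
      · left; nlinarith [q1, q2]
    · have e2 : Nat.fib (k + 1 + 1) = Nat.fib k + Nat.fib (k + 1) := Nat.fib_add_two
      omega

def pvIsFibVal (m : ℕ) : Prop := ∃ k, Nat.fib k = m

lemma pv_le_fib_add_two : ∀ n : ℕ, n ≤ Nat.fib (n + 2) := by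
  intro n
  induction n with
  | zero => simp
  | succ n ih =>
    have e : Nat.fib (n + 1 + 2) = Nat.fib (n + 1) + Nat.fib (n + 1 + 1) := Nat.fib_add_two
    have e3 : Nat.fib (n + 2) = Nat.fib (n + 1 + 1) := by rw [show n + 2 = n + 1 + 1 from by omega]
    have h1 : 0 < Nat.fib (n + 1) := Nat.fib_pos.mpr (by omega)
    omega

lemma pv_loop_isFib : ∀ (fuel t m : ℕ), ∃ s, pvFibLoopB fuel (Nat.fib t) (Nat.fib (t + 1)) m = Nat.fib s := by
  intro fuel
  induction fuel with
  | zero => intro t m; exact ⟨t, rfl⟩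
  | succ fuel ih =>
    intro t m
    simp only [pvFibLoopB]
    by_cases h : Nat.fib t < m
    · rw [if_pos h]
      have e : Nat.fib t + Nat.fib (t + 1) = Nat.fib (t + 2) := Nat.fib_add_two.symm
      rw [e]
      exact ih (t + 1) m
    · rw [if_neg h]; exact ⟨t, rfl⟩

lemma pv_loop_complete : ∀ (fuel t m : ℕ), pvIsFibVal m → Nat.fib t ≤ m → m ≤ Nat.fib (t + fuel) →
    pvFibLoopB fuel (Nat.fib t) (Nat.fib (t + 1)) m = m := by
  intro fuel
  induction fuel with
  | zero =>
    intro t m _ h1 h2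
    simp only [Nat.add_zero] at h2
    simpa [pvFibLoopB] using le_antisymm h1 h2
  | succ fuel ih =>
    intro t m hfib h1 h2
    simp only [pvFibLoopB]
    by_cases h : Nat.fib t < m
    · rw [if_pos h]
      have e : Nat.fib t + Nat.fib (t + 1) = Nat.fib (t + 2) := Nat.fib_add_two.symm
      rw [e]
      obtain ⟨k, hk⟩ := hfib
      have hkt : t < k := by
        by_contra hc
        rw [not_lt] at hc
        exact absurd (hk ▸ Nat.fib_mono hc) (by omega)
      have h1' : Nat.fib (t + 1) ≤ m := hk ▸ Nat.fib_mono (by omega)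
      have h2' : m ≤ Nat.fib (t + 1 + fuel) := by
        have : t + 1 + fuel = t + (fuel + 1) := by omega
        rw [this]; exact h2
      exact ih (t + 1) m ⟨k, hk⟩ h1' h2'
    · rw [if_neg h]; omega

-- A's Fibonacci flag and B's Fibonacci flag agree
lemma pv_fib_eq (n : Int) :
    (pvPerfSqA (5 * n * n + 4) || pvPerfSqA (5 * n * n - 4)) =
    (pvFibLoopB (n.natAbs + 3) 0 1 n.natAbs == n.natAbs) := by
  set m := n.natAbs with hm
  have hnn : n * n = ((m * m : ℕ) : Int) := by rw [hm, Int.natAbs_mul_self]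
  have hL : (pvPerfSqA (5 * n * n + 4) || pvPerfSqA (5 * n * n - 4)) = true ↔ pvIsFibVal m := by
    constructor
    · intro h
      simp only [Bool.or_eq_true] at h
      rcases h with h | h
      · have h4 : (0:Int) ≤ 5 * n * n + 4 := by nlinarith [mul_self_nonneg n]
        obtain ⟨s, hs⟩ := (pv_perfSqA_iff _ h4).mp h
        have ht : (5 * n * n + 4).toNat = 5 * (m * m) + 4 := by
          rw [show 5 * n * n + 4 = 5 * ((m * m : ℕ) : Int) + 4 from by rw [← hnn]; ring]
          omega
        obtain ⟨k, hk, -⟩ := pv_descent m s (Or.inl (by omega))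
        exact ⟨k, hk⟩
      · rcases Nat.eq_zero_or_pos m with h0 | h0
        · exfalso
          have hn0 : n = 0 := by omega
          rw [hn0] at h
          norm_num [pvPerfSqA] at h
        · have h1m : 1 ≤ m * m := Nat.one_le_iff_ne_zero.mpr (by positivity)
          have h4 : (0:Int) ≤ 5 * n * n - 4 := by
            rw [show 5 * n * n - 4 = 5 * ((m * m : ℕ) : Int) - 4 from by rw [← hnn]; ring]
            omega
          obtain ⟨s, hs⟩ := (pv_perfSqA_iff _ h4).mp h
          have ht : (5 * n * n - 4).toNat = 5 * (m * m) - 4 := by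
            rw [show 5 * n * n - 4 = 5 * ((m * m : ℕ) : Int) - 4 from by rw [← hnn]; ring]
            omega
          obtain ⟨k, hk, -⟩ := pv_descent m s (Or.inr (by omega))
          exact ⟨k, hk⟩
    · rintro ⟨k, hk⟩
      obtain ⟨x, hxc, -⟩ := pv_ascent k
      rw [hk] at hxc
      rcases hxc with hc | hc
      · simp only [Bool.or_eq_true]
        left
        have h4 : (0:Int) ≤ 5 * n * n + 4 := by nlinarith [mul_self_nonneg n]
        apply (pv_perfSqA_iff _ h4).mpr
        refine ⟨x, ?_⟩
        have ht : (5 * n * n + 4).toNat = 5 * (m * m) + 4 := by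
          rw [show 5 * n * n + 4 = 5 * ((m * m : ℕ) : Int) + 4 from by rw [← hnn]; ring]
          omega
        omega
      · simp only [Bool.or_eq_true]
        right
        have h1m : 1 ≤ m * m := by
          rcases Nat.eq_zero_or_pos (m * m) with h0 | h0
          · omega
          · omega
        have h4 : (0:Int) ≤ 5 * n * n - 4 := by
          rw [show 5 * n * n - 4 = 5 * ((m * m : ℕ) : Int) - 4 from by rw [← hnn]; ring]
          omega
        apply (pv_perfSqA_iff _ h4).mpr
        refine ⟨x, ?_⟩
        have ht : (5 * n * n - 4).toNat = 5 * (m * m) - 4 := by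
          rw [show 5 * n * n - 4 = 5 * ((m * m : ℕ) : Int) - 4 from by rw [← hnn]; ring]
          omega
        omega
  have hR : (pvFibLoopB (m + 3) 0 1 m == m) = true ↔ pvIsFibVal m := by
    rw [beq_iff_eq]
    have hz : Nat.fib 0 = 0 := Nat.fib_zero
    have ho : Nat.fib (0 + 1) = 1 := by simp
    constructor
    · intro h
      obtain ⟨s, hs⟩ := pv_loop_isFib (m + 3) 0 m
      rw [hz, ho] at hs
      exact ⟨s, by omega⟩
    · rintro ⟨k, hk⟩
      have hup : m ≤ Nat.fib (0 + (m + 3)) := by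
        have h1 := pv_le_fib_add_two m
        have h2 : Nat.fib (m + 2) ≤ Nat.fib (0 + (m + 3)) := Nat.fib_mono (by omega)
        omega
      have := pv_loop_complete (m + 3) 0 m ⟨k, hk⟩ (by omega) hup
      rw [hz, ho] at this
      exact this
  exact Bool.eq_iff_iff.mpr (hL.trans hR.symm)

-- A's prime flag and B's prime flag agree
lemma pv_prime_eq (n : Int) :
    (if n < 2 then false
     else if n == 2 then true
     else if PySem.Int.mod n 2 == 0 then false
     else pvPrimeLoopA n (PySem.List.pyRange 3 ((Nat.sqrt n.toNat : Int) + 1) 2)) =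
    (decide (2 ≤ n) &&
      (PySem.List.pyRange 2 ((Nat.sqrt n.toNat : Int) + 1) 1).all
        (fun i => !(PySem.Int.mod n i == 0))) := by
  by_cases h1 : n < 2
  · rw [if_pos h1]
    simp [show ¬ (2 ≤ n) from by omega]
  · rw [if_neg h1]
    have h1' : 2 ≤ n := by omega
    by_cases h2 : n = 2
    · subst h2
      have hs : Nat.sqrt (2:Int).toNat = 1 := by
        have ha : 1 ≤ Nat.sqrt 2 := Nat.le_sqrt.mpr (by norm_num)
        have hb : Nat.sqrt 2 < 2 := Nat.sqrt_lt.mpr (by norm_num)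
        show Nat.sqrt 2 = 1
        omega
      rw [hs]
      rw [PySem.List.pyRange_one_eq_nil (by norm_num)]
      simp
    · rw [if_neg (by simpa using h2)]
      by_cases h3 : PySem.Int.mod n 2 == 0
      · rw [if_pos h3]
        have hdvd : (2:Int) ∣ n := (PySem.Int.mod_eq_zero_iff_dvd n 2).mp (by simpa using h3)
        have hn4 : (4:Int) ≤ n := by
          rcases hdvd with ⟨c, hc⟩
          omega
        have hsq : 2 ≤ Nat.sqrt n.toNat := Nat.le_sqrt.mpr (by omega)
        have hmem : (2:Int) ∈ PySem.List.pyRange 2 ((Nat.sqrt n.toNat : Int) + 1) 1 :=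
          PySem.List.mem_pyRange_one.mpr ⟨le_refl _, by omega⟩
        have hall : ((PySem.List.pyRange 2 ((Nat.sqrt n.toNat : Int) + 1) 1).all
            (fun i => !(PySem.Int.mod n i == 0))) = false :=
          List.all_eq_false.mpr ⟨2, hmem, by simpa using h3⟩
        simp [hall]
      · rw [if_neg h3]
        have hnd2 : ¬ (2:Int) ∣ n := fun hd => h3 (by
          simpa using (PySem.Int.mod_eq_zero_iff_dvd n 2).mpr hd)
        rw [pv_primeLoopA_eq_all]
        rw [show decide (2 ≤ n) = true from by simp [h1'], Bool.true_and]
        apply Bool.eq_iff_iff.mpr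
        rw [List.all_eq_true, List.all_eq_true]
        constructor
        · intro H i hi
          obtain ⟨hi1, hi2⟩ := PySem.List.mem_pyRange_one.mp hi
          by_cases hie : (2:Int) ∣ i
          · have hmm : ¬ PySem.Int.mod n i = 0 := fun h0 =>
              hnd2 (dvd_trans hie ((PySem.Int.mod_eq_zero_iff_dvd n i).mp h0))
            simpa using hmm
          · have hi3 : 3 ≤ i ∧ (2:Int) ∣ i - 3 := by omega
            exact H i ((PySem.List.mem_pyRange_iff_of_pos (by norm_num) i).mpr ⟨hi3.1, hi2, hi3.2⟩)
        · intro H i hi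
          obtain ⟨hi1, hi2, hi3⟩ := (PySem.List.mem_pyRange_iff_of_pos (by norm_num) i).mp hi
          exact H i (PySem.List.mem_pyRange_one.mpr ⟨by omega, hi2⟩)

-- ===== VERDICT (by name: the statement is the Claim_ definition above) =====
theorem is_prime_fibonacci_even_spec : Claim_equal_is_prime_fibonacci_even := by
  intro number _
  unfold Spec_is_prime_fibonacci_even is_prime_fibonacci_even is_prime_fibonacci_even_alt
  simp only []
  rw [pv_prime_eq number, pv_fib_eq number]
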